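-- pv_equiv track=rewrite | github.com/AxelSchneewind/cpa | test_progs/sum_cubes_unsafe.py | sum_cubes
-- ===== SOURCE A (Python) =====
-- def inc(x):
--     return x + 1
--
-- def add(x, y):
--     return x + y + 1  # BUG: extra +1
--
-- def sum_cubes(n):
--     s = 0
--     i = 0
--     while i < n:
--         j = 0
--         while j < n:
--             k = 0
--             while k < n:
--                 s += add(i, add(j, k))
--                 k = inc(k)
--             j = inc(j)
--         i = inc(i)
--     return s
-- ===== SOURCE B (Python) =====
-- def sum_cubes(n):
--     # closed form: sum over i,j,k in [0,n) of (i+j+k+2) = n^3*(3n+1)/2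
--     if n <= 0:
--         return 0
--     return n ** 3 * (3 * n + 1) // 2
-- ===== Notes on version B (the rewrite author's own statement) =====
-- stated objective: faster
-- what changed: Replaced the three nested while-loops summing i+j+k+2 over all triples with the closed-form formula n^3*(3n+1)//2 (0 for n<=0).
import Mathlib
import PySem

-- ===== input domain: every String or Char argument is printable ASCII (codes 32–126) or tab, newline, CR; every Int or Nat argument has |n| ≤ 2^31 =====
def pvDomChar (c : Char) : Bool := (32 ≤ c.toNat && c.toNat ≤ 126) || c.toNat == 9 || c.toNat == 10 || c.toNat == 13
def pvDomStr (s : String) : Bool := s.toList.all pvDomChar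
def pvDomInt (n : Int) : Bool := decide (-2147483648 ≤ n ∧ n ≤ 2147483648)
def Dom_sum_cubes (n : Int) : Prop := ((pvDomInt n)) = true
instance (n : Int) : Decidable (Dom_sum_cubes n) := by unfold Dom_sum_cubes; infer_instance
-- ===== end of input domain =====

-- B replaces A's three nested counting loops by the closed-form formula n^3*(3n+1)//2; faster (O(1) vs O(n^3)).

-- ===== PORT A =====
def pvInc (x : Int) : Int := x + 1

def pvAdd (x y : Int) : Int := x + y + 1  -- BUG in A's source: extra +1 (ported literally)

-- innermost 'while k < n' loop
def pvLoopK (n i j k s : Int) : Int :=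
  if k < n then pvLoopK n i j (pvInc k) (s + pvAdd i (pvAdd j k)) else s
termination_by (n - k).toNat
decreasing_by simp only [pvInc]; omega

-- middle 'while j < n' loop
def pvLoopJ (n i j s : Int) : Int :=
  if j < n then pvLoopJ n i (pvInc j) (pvLoopK n i j 0 s) else s
termination_by (n - j).toNat
decreasing_by simp only [pvInc]; omega

-- outer 'while i < n' loop
def pvLoopI (n i s : Int) : Int :=
  if i < n then pvLoopI n (pvInc i) (pvLoopJ n i 0 s) else s
termination_by (n - i).toNat
decreasing_by simp only [pvInc]; omega

def sum_cubes (n : Int) : Int := pvLoopI n 0 0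

-- ===== PORT B =====
def sum_cubes_alt (n : Int) : Int :=
  if n ≤ 0 then 0 else PySem.Int.floordiv (n ^ 3 * (3 * n + 1)) 2

-- ===== PRECONDITION & SPEC =====
def Spec_sum_cubes (n : Int) (out : Int) : Prop := out = sum_cubes_alt n
instance (n : Int) (out : Int) : Decidable (Spec_sum_cubes n out) := by unfold Spec_sum_cubes; infer_instance

-- ===== CLAIM (what is proved, stated in full; the proofs are below) =====
def Claim_equal_sum_cubes : Prop := ∀ (n : Int), Dom_sum_cubes n → Spec_sum_cubes n (sum_cubes n)

-- ===== LEMMAS AND PROOFS =====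

theorem pvLoopK_closed (n i j : Int) :
    ∀ (m : Nat) (k s : Int), n - k = (m : Int) →
      2 * pvLoopK n i j k s = 2 * s + 2 * m * (i + j + k) + m * (m + 3) := by
  intro m
  induction m with
  | zero =>
    intro k s h
    rw [pvLoopK, if_neg (by omega)]
    push_cast; ring
  | succ m ih =>
    intro k s h
    rw [pvLoopK, if_pos (by omega)]
    have := ih (pvInc k) (s + pvAdd i (pvAdd j k)) (by simp only [pvInc]; omega)
    simp only [pvInc, pvAdd] at this ⊢
    push_cast at this ⊢
    linarith [this, mul_comm (2 : Int) (i + j + k)]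

theorem pvLoopJ_closed (n i : Int) (hn : 0 ≤ n) :
    ∀ (m : Nat) (j s : Int), n - j = (m : Int) →
      2 * pvLoopJ n i j s =
        2 * s + 2 * n * m * (i + j) + n * m * (m - 1) + m * n * (n + 3) := by
  intro m
  induction m with
  | zero =>
    intro j s h
    rw [pvLoopJ, if_neg (by omega)]
    push_cast; ring
  | succ m ih =>
    intro j s h
    rw [pvLoopJ, if_pos (by omega)]
    have hK := pvLoopK_closed n i j n.toNat 0 s (by omega)
    have hn' : ((n.toNat : Int)) = n := by omega
    rw [hn'] at hK
    have := ih (pvInc j) (pvLoopK n i j 0 s) (by simp only [pvInc]; omega)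
    simp only [pvInc] at this ⊢
    push_cast at this ⊢
    linear_combination this + hK

theorem pvLoopI_closed (n : Int) (hn : 0 ≤ n) :
    ∀ (m : Nat) (i s : Int), n - i = (m : Int) →
      2 * pvLoopI n i s =
        2 * s + 2 * n ^ 2 * m * i + n ^ 2 * m * (m - 1) + m * n ^ 2 * (2 * n + 2) := by
  intro m
  induction m with
  | zero =>
    intro i s h
    rw [pvLoopI, if_neg (by omega)]
    push_cast; ring
  | succ m ih =>
    intro i s h
    rw [pvLoopI, if_pos (by omega)]
    have hJ := pvLoopJ_closed n i hn n.toNat 0 s (by omega)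
    have hn' : ((n.toNat : Int)) = n := by omega
    rw [hn'] at hJ
    have := ih (pvInc i) (pvLoopJ n i 0 s) (by simp only [pvInc]; omega)
    simp only [pvInc] at this ⊢
    push_cast at this ⊢
    linear_combination this + hJ

theorem sum_cubes_double (n : Int) (hn : 0 ≤ n) :
    2 * sum_cubes n = n ^ 3 * (3 * n + 1) := by
  have h := pvLoopI_closed n hn n.toNat 0 0 (by omega)
  have hn' : ((n.toNat : Int)) = n := by omega
  rw [hn'] at h
  unfold sum_cubes
  nlinarith [h]

-- ===== VERDICT (by name: the statement is the Claim_ definition above) =====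
theorem sum_cubes_spec : Claim_equal_sum_cubes := by
  intro n _
  unfold Spec_sum_cubes sum_cubes_alt
  by_cases hn : n ≤ 0
  · rw [if_pos hn]
    unfold sum_cubes
    rw [pvLoopI, if_neg (by omega)]
  · rw [if_neg hn]
    have h := sum_cubes_double n (by omega)
    rw [← h]
    rw [mul_comm (2 : Int) (sum_cubes n), PySem.Int.floordiv_eq_ediv_of_pos (by omega)]
    omega
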